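-- pv_equiv track=rewrite | github.com/nlpathak/Scriptor | scriptor-backend/backend/podcasts/models.py | tokenize_completion_field
-- ===== SOURCE A (Python) =====
-- def tokenize_completion_field(string):
--     if not string:
--         return []
--     tokens = string.split(" ")
--     phrases = []
--     for idx in range(0, len(tokens)):
--         phrases.append(" ".join(tokens[idx:]))
--     return phrases
-- ===== SOURCE B (Python) =====
-- def tokenize_completion_field(string):
--     if not string:
--         return []
--     tokens = string.split(" ")
--     acc = tokens[-1]
--     out = [acc]
--     for token in reversed(tokens[:-1]):
--         acc = token + " " + acc
--         out.append(acc)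
--     out.reverse()
--     return out
-- ===== Notes on version B (the rewrite author's own statement) =====
-- stated objective: alternative
-- what changed: Instead of re-joining a fresh slice tokens[idx:] for every index, B walks the tokens once from the end, threading one accumulated suffix string (acc = token + ' ' + acc) and reversing the collected list at the end.
import Mathlib
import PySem

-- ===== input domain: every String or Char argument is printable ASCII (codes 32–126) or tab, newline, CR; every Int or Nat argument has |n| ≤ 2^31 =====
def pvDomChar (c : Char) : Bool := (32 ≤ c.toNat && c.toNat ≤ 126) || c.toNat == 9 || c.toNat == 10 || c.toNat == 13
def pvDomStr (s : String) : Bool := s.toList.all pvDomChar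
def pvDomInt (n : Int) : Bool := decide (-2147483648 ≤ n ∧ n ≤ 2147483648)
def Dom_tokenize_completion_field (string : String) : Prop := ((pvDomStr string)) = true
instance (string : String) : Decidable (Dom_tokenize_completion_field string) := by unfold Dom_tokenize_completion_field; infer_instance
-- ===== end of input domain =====

-- B rebuilds the suffix phrases by threading one accumulated string from the last token backwards
-- instead of re-joining a fresh slice for every index (objective: alternative decomposition).


-- ===== PORT A =====
def tokenize_completion_field (string : String) : List String :=
  if string == "" then []
  else
    let tokens := (PySem.Str.split? string " ").getD []
    (PySem.List.pyRange 0 (tokens.length : Int) 1).foldl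
      (fun phrases idx =>
        phrases ++ [PySem.Str.join " " (PySem.List.slice tokens (some idx) none)]) []

-- ===== PORT B =====
def tokenize_completion_field_alt (string : String) : List String :=
  if string == "" then []
  else
    let tokens := (PySem.Str.split? string " ").getD []
    let acc0 := PySem.List.pyGetD tokens (-1) ""
    let st :=
      ((PySem.List.slice tokens none (some (-1))).reverse).foldl
        (fun (st : String × List String) token =>
          let acc := token ++ " " ++ st.1
          (acc, st.2 ++ [acc]))
        (acc0, [acc0])
    st.2.reverse

-- ===== PRECONDITION & SPEC =====
def Spec_tokenize_completion_field (string : String) (out : List String) : Prop := out = tokenize_completion_field_alt string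
instance (string : String) (out : List String) : Decidable (Spec_tokenize_completion_field string out) := by unfold Spec_tokenize_completion_field; infer_instance

-- ===== CLAIM (what is proved, stated in full; the proofs are below) =====
def Claim_equal_tokenize_completion_field : Prop := ∀ (string : String), Dom_tokenize_completion_field string → Spec_tokenize_completion_field string (tokenize_completion_field string)

-- ===== LEMMAS AND PROOFS =====

-- the suffix phrases of a token list: index 0 joins all tokens
def pvSuffixes : List String → List String
  | [] => []
  | t :: ts => PySem.Str.join " " (t :: ts) :: pvSuffixes ts

theorem pv_join_singleton (a : String) : PySem.Str.join " " [a] = a := by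
  rw [← String.toList_inj, PySem.Str.toList_join]
  simp [PySem.Chars.join_singleton]

theorem pv_join_cons_cons (a b : String) (l : List String) :
    PySem.Str.join " " (a :: b :: l) = a ++ " " ++ PySem.Str.join " " (b :: l) := by
  rw [← String.toList_inj, PySem.Str.toList_join]
  simp [PySem.Chars.join_cons_cons, PySem.Str.toList_join]

theorem pv_foldl_app {α β : Type} (f : α → β) :
    ∀ (l : List α) (init : List β),
      l.foldl (fun acc x => acc ++ [f x]) init = init ++ l.map f := by
  intro l
  induction l with
  | nil => simp
  | cons x xs ih => intro init; simp [List.foldl_cons, ih]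

theorem pv_go_ne_nil (sep : List Char) :
    ∀ (fuel : Nat) (l cur : List Char) (acc : List (List Char)),
      PySem.Chars.splitOn.go sep fuel l cur acc ≠ [] := by
  intro fuel l cur acc
  fun_induction PySem.Chars.splitOn.go <;> simp_all

theorem pv_tokens_ne_nil (s : String) : (PySem.Str.split? s " ").getD [] ≠ [] := by
  simp only [PySem.Str.split?, PySem.Chars.split?, PySem.Chars.splitOn]
  simp only [show (" " : String).toList = [' '] from rfl]
  simp only [List.isEmpty_cons, Option.map_some, Option.getD_some, if_neg (by decide : ¬ (false = true))]
  simp only [ne_eq, List.map_eq_nil_iff]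
  exact pv_go_ne_nil [' '] _ _ _ _

theorem pv_map_drop (ts : List String) :
    (List.range ts.length).map (fun k => PySem.Str.join " " (ts.drop k)) = pvSuffixes ts := by
  induction ts with
  | nil => simp [pvSuffixes]
  | cons t ts ih =>
    rw [List.length_cons, List.range_succ_eq_map]
    simp only [List.map_cons, List.map_map, Function.comp_def, List.drop_zero, List.drop_succ_cons]
    rw [pvSuffixes]
    exact congrArg _ ih

-- A's loop computes the suffix phrases
theorem pv_A_loop (ts : List String) :
    (PySem.List.pyRange 0 (ts.length : Int) 1).foldl
      (fun phrases idx =>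
        phrases ++ [PySem.Str.join " " (PySem.List.slice ts (some idx) none)]) []
    = pvSuffixes ts := by
  rw [pv_foldl_app, PySem.List.pyRange_one]
  simp only [Int.sub_zero, Int.toNat_natCast, List.map_map, List.nil_append]
  have hmap : ∀ (k : Nat),
      PySem.Str.join " " (PySem.List.slice ts (some ((0 : Int) + (k : Int))) none)
        = PySem.Str.join " " (ts.drop k) := by
    intro k
    rw [show (0 : Int) + (k : Int) = (k : Int) by ring, PySem.List.slice_from_natCast]
  simp only [Function.comp_def, hmap]
  exact pv_map_drop ts

-- B's fold invariant: state = (join of remaining tokens, suffix phrases so far in reverse)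
theorem pv_B_loop (ts : List String) (h : ts ≠ []) :
    ((PySem.List.slice ts none (some (-1))).reverse).foldl
        (fun (st : String × List String) token =>
          let acc := token ++ " " ++ st.1
          (acc, st.2 ++ [acc]))
        (PySem.List.pyGetD ts (-1) "", [PySem.List.pyGetD ts (-1) ""])
      = (PySem.Str.join " " ts, (pvSuffixes ts).reverse) := by
  induction ts with
  | nil => exact absurd rfl h
  | cons t ts ih =>
    cases ts with
    | nil =>
      simp [PySem.List.slice_to_neg_one, PySem.List.pyGetD, PySem.List.pyGet?,
        PySem.List.pyIdx?, pvSuffixes, pv_join_singleton]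
    | cons b l =>
      have hne : (b :: l : List String) ≠ [] := by simp
      have hlast : PySem.List.pyGetD (t :: b :: l) (-1) "" = PySem.List.pyGetD (b :: l) (-1) "" := by
        simp [PySem.List.pyGetD, PySem.List.pyGet?, PySem.List.pyIdx?]
        rfl
      rw [PySem.List.slice_to_neg_one, List.dropLast_cons_of_ne_nil hne, List.reverse_cons,
        List.foldl_append, hlast]
      rw [PySem.List.slice_to_neg_one] at ih
      rw [ih hne]
      simp only [List.foldl_cons, List.foldl_nil]
      simp [pvSuffixes]
      exact (pv_join_cons_cons t b l).symm

-- ===== VERDICT (by name: the statement is the Claim_ definition above) =====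
theorem tokenize_completion_field_spec : Claim_equal_tokenize_completion_field := by
  intro s _
  unfold Spec_tokenize_completion_field tokenize_completion_field tokenize_completion_field_alt
  by_cases hs : s == ""
  · simp [hs]
  · simp only [hs, if_false, Bool.false_eq_true]
    rw [pv_A_loop, pv_B_loop _ (pv_tokens_ne_nil s)]
    simp
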